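-- pv_equiv track=rewrite | github.com/Enki013/context-rag | src/chunker.py | _build_page_index
-- ===== SOURCE A (Python) =====
-- def _build_page_index(pages: list[dict]) -> list[tuple[int, int, int]]:
--     """
--     Her sayfanın birleşik metindeki başlangıç ve bitiş offset'ini hesaplar.
--
--     Returns:
--         [(page_num, start_offset, end_offset), ...]
--     """
--     index = []
--     offset = 0
--     for page in pages:
--         length = len(page["text"])
--         index.append((page["page"], offset, offset + length))
--         offset += length + 2  # +2 for "\n\n" separator in get_full_text
--     return index
-- ===== SOURCE B (Python) =====
-- def _build_page_index(pages: list[dict]) -> list[tuple[int, int, int]]: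
--     """Recursive compute-then-shift: build the tail's index at offset 0, then
--     translate every tail entry by the head's footprint (len + 2). No running
--     accumulator exists anywhere."""
--     if not pages:
--         return []
--     head, rest = pages[0], pages[1:]
--     length = len(head["text"])
--     shift = length + 2
--     tail = _build_page_index(rest)
--     return [(head["page"], 0, length)] + [(p, s + shift, e + shift) for p, s, e in tail]
-- ===== Notes on version B (the rewrite author's own statement) =====
-- stated objective: alternative
-- what changed: Replaces A's single forward loop carrying a running offset by structural recursion with no accumulator at all: the tail's index is built independently at offset 0 and then every tail entry is translated by the head's footprint (len+2).
import Mathlib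
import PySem

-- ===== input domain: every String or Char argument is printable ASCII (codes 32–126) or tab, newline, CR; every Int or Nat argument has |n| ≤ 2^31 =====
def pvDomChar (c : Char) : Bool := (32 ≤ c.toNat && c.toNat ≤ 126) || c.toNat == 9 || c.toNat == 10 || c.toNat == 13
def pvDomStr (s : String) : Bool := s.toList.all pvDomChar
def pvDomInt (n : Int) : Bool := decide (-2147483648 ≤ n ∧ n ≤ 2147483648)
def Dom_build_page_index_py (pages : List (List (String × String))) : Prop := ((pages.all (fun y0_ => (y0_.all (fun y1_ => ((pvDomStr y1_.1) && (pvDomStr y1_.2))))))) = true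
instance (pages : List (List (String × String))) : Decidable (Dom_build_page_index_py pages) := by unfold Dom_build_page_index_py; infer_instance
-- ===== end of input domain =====

-- B replaces A's accumulator loop by structural recursion that builds the tail's index at offset 0 and shifts it by the head's footprint; alternative decomposition, not faster.


-- ===== PORT A =====
-- page["text"] / page["page"]: first-match lookup; Pre_ guarantees the keys exist, so getD never fires.
def build_page_index_py (pages : List (List (String × String))) : List (String × Int × Int) :=
  (pages.foldl (fun (st : List (String × Int × Int) × Int) page =>
      let length : Int := PySem.Str.len ((PySem.Dict.mk page).getD "text" "")
      (st.1 ++ [((PySem.Dict.mk page).getD "page" "", st.2, st.2 + length)], st.2 + length + 2))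
    ([], 0)).1

-- ===== PORT B =====
def build_page_index_py_alt (pages : List (List (String × String))) : List (String × Int × Int) :=
  match pages with
  | [] => []
  | head :: rest =>
    let length : Int := PySem.Str.len ((PySem.Dict.mk head).getD "text" "")
    let shift : Int := length + 2
    let tail := build_page_index_py_alt rest
    [((PySem.Dict.mk head).getD "page" "", 0, length)] ++
      tail.map (fun x => (x.1, x.2.1 + shift, x.2.2 + shift))

-- ===== PRECONDITION & SPEC =====
-- Pre_ excludes pages missing the "text" or "page" key, on which the Python A raises KeyError (as does B).
def Pre_build_page_index_py (pages : List (List (String × String))) : Prop :=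
  ∀ p ∈ pages, ((PySem.Dict.mk p).get? "text").isSome ∧ ((PySem.Dict.mk p).get? "page").isSome
instance (pages : List (List (String × String))) : Decidable (Pre_build_page_index_py pages) := by unfold Pre_build_page_index_py; infer_instance

def pvWitness_build_page_index_py : (List (List (String × String))) :=
  [[("page", "1"), ("text", "ab")], [("page", "2"), ("text", "xyz")]]

def Spec_build_page_index_py (pages : List (List (String × String))) (out : List (String × Int × Int)) : Prop := out = build_page_index_py_alt pages
instance (pages : List (List (String × String))) (out : List (String × Int × Int)) : Decidable (Spec_build_page_index_py pages out) := by unfold Spec_build_page_index_py; infer_instance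

-- ===== CLAIM (what is proved, stated in full; the proofs are below) =====
def Claim_equal_build_page_index_py : Prop := ∀ (pages : List (List (String × String))), Dom_build_page_index_py pages → Pre_build_page_index_py pages → Spec_build_page_index_py pages (build_page_index_py pages)

-- ===== LEMMAS AND PROOFS =====

-- A's fold, with the accumulator made explicit
theorem pvA_fold (pages : List (List (String × String)))
    (acc : List (String × Int × Int)) (off : Int) :
    (pages.foldl (fun (st : List (String × Int × Int) × Int) page =>
        let length : Int := PySem.Str.len ((PySem.Dict.mk page).getD "text" "")
        (st.1 ++ [((PySem.Dict.mk page).getD "page" "", st.2, st.2 + length)], st.2 + length + 2))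
      (acc, off)).1
    = acc ++ (build_page_index_py_alt pages).map (fun x => (x.1, x.2.1 + off, x.2.2 + off)) := by
  induction pages generalizing acc off with
  | nil => simp [build_page_index_py_alt]
  | cons p ps ih =>
    rw [List.foldl_cons, ih]
    simp [build_page_index_py_alt, List.map_map, Function.comp]
    constructor
    · omega
    · intro a st en _
      omega

-- ===== VERDICT (by name: the statement is the Claim_ definition above) =====
theorem build_page_index_py_spec : Claim_equal_build_page_index_py := by
  intro pages _ _
  unfold Spec_build_page_index_py build_page_index_py
  rw [pvA_fold]
  simp [List.map_id']
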